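-- pv_equiv track=rewrite | github.com/OoliteProject/oolite-debug-console | debugGUI/miscUtils.py | sliceBindngs
-- ===== SOURCE A (Python) =====
-- def sliceBindngs(binding):
-- 	# typical Tcl callback
-- 	# 'if {"[2557347361152_handler %# %b %f %h %k %s %t %w %x %y %A %E %K %N %W %T %X %Y %D]" == "break"} break'
-- 	bindList = []
-- 	for bindStr in binding.split('\n'):
-- 		if bindStr.startswith('if {"['):
-- 			space = bindStr.find(' ', 6) # 6 = len('if {"[')
-- 			if -1 < space:
-- 				bindStr = bindStr[6:space]
-- 		bindList.append(bindStr)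
-- 	return bindList
-- ===== SOURCE B (Python) =====
-- def sliceBindngs(binding):
-- 	# One streaming pass over the raw characters (no split): a state machine
-- 	# tracks the current line and captures the handler token the moment the
-- 	# first space at or after index 6 of an 'if {"['-prefixed line is seen.
-- 	out = []
-- 	line = ''
-- 	tok = None
-- 	for ch in binding:
-- 		if ch == '\n':
-- 			out.append(line if tok is None else tok)
-- 			line, tok = '', None
-- 		else:
-- 			if tok is None and ch == ' ' and line.startswith('if {"['):
-- 				tok = line[6:]
-- 			line += ch
-- 	out.append(line if tok is None else tok)
-- 	return out
-- ===== Notes on version B (the rewrite author's own statement) =====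
-- stated objective: alternative
-- what changed: Replaces split-into-lines plus per-line find/slice by a single streaming pass over the raw characters with a state machine that accumulates the current line and captures the handler token the moment the first delimiting space of a callback-prefixed line is scanned.
import Mathlib
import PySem

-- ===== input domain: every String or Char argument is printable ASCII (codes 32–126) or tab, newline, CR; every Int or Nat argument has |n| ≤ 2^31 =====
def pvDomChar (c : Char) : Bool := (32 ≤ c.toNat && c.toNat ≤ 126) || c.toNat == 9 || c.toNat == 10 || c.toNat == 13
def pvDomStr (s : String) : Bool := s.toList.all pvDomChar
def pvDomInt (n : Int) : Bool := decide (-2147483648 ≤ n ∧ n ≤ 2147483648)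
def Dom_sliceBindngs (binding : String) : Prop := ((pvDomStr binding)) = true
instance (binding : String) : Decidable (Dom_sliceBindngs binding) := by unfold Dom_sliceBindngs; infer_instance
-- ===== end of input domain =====

-- B replaces A's split-then-find/slice per line by a single streaming pass over the
-- characters with a state machine that captures each handler token as it is scanned
-- (objective: alternative; same cost).


-- ===== PORT A =====
-- binding.split('\n') with a non-empty separator never raises, so split? is always some
def sliceBindngs (binding : String) : List String :=
  ((PySem.Str.split? binding "\n").getD []).foldl
    (fun bindList bindStr =>
      let bindStr :=
        if PySem.Str.startswith bindStr "if {\"[" then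
          let space := PySem.Str.findFrom bindStr " " 6
          if (-1 : Int) < space then PySem.Str.slice bindStr (some 6) (some space)
          else bindStr
        else bindStr
      bindList ++ [bindStr]) []

-- ===== PORT B =====
-- state = (out, line, tok): output so far, chars of the current line, the captured
-- handler token (none until the delimiting space of a prefixed line is seen)
def pvStep (st : List String × List Char × Option (List Char)) (ch : Char) :
    List String × List Char × Option (List Char) :=
  if ch = '\n' then (st.1 ++ [String.ofList (st.2.2.getD st.2.1)], [], none)
  else if st.2.2 = none ∧ ch = ' ' ∧ PySem.Chars.startswith st.2.1 ("if {\"[").toList = true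
  then (st.1, st.2.1 ++ [ch], some (st.2.1.drop 6))
  else (st.1, st.2.1 ++ [ch], st.2.2)

def sliceBindngs_alt (binding : String) : List String :=
  let st := binding.toList.foldl pvStep ([], [], none)
  st.1 ++ [String.ofList (st.2.2.getD st.2.1)]

-- ===== PRECONDITION & SPEC =====
def Spec_sliceBindngs (binding : String) (out : List String) : Prop := out = sliceBindngs_alt binding
instance (binding : String) (out : List String) : Decidable (Spec_sliceBindngs binding out) := by unfold Spec_sliceBindngs; infer_instance

-- ===== CLAIM (what is proved, stated in full; the proofs are below) =====
def Claim_equal_sliceBindngs : Prop := ∀ (binding : String), Dom_sliceBindngs binding → Spec_sliceBindngs binding (sliceBindngs binding)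

-- ===== LEMMAS AND PROOFS =====

-- split on '\n' as a plain structural recursion (proof-side model of splitOn)
def pvSplitNl : List Char → List (List Char)
  | [] => [[]]
  | c :: t => if c = '\n' then [] :: pvSplitNl t else (c :: (pvSplitNl t).headD []) :: (pvSplitNl t).tail

theorem pvSplitNl_ne_nil (l : List Char) : pvSplitNl l ≠ [] := by
  cases l with
  | nil => simp [pvSplitNl]
  | cons c t => by_cases h : c = '\n' <;> simp [pvSplitNl, h]

theorem pv_go (fuel : Nat) : ∀ (l cur : List Char) (acc : List (List Char)), l.length < fuel →
    PySem.Chars.splitOn.go ['\n'] fuel l cur acc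
      = acc.reverse ++ (pvSplitNl l).modifyHead (cur.reverse ++ ·) := by
  induction fuel with
  | zero => intro l cur acc h; omega
  | succ f ih =>
    intro l cur acc h
    cases l with
    | nil => simp [PySem.Chars.splitOn.go, pvSplitNl, List.modifyHead]
    | cons c rest =>
      rw [PySem.Chars.splitOn.go]
      by_cases hc : c = '\n'
      · subst hc
        have hp : List.isPrefixOf ['\n'] ('\n' :: rest) = true := by
          simp [List.isPrefixOf]
        simp only [hp, if_pos, List.length_cons, List.length_nil, List.drop_succ_cons,
          List.drop_zero]
        rw [ih rest [] _ (by simpa using h)]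
        obtain ⟨hd, tl, heq⟩ := List.exists_cons_of_ne_nil (pvSplitNl_ne_nil rest)
        simp [pvSplitNl, heq, List.modifyHead]
      · have hp : List.isPrefixOf ['\n'] (c :: rest) = false := by
          have hc' : ¬ ('\n' = c) := fun hx => hc hx.symm
          simp [List.isPrefixOf, hc']
        simp only [hp, Bool.false_eq_true, if_false]
        rw [ih rest (c :: cur) _ (by simpa using h)]
        obtain ⟨hd, tl, heq⟩ := List.exists_cons_of_ne_nil (pvSplitNl_ne_nil rest)
        simp [pvSplitNl, hc, heq, List.modifyHead]

theorem pv_split_eq (binding : String) :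
    (PySem.Str.split? binding "\n").getD [] = (pvSplitNl binding.toList).map String.ofList := by
  have hsep : ("\n").toList = ['\n'] := by decide
  rw [PySem.Str.split?, hsep]
  rw [PySem.Chars.split?]
  simp only [List.isEmpty_cons, Bool.false_eq_true, if_false]
  rw [PySem.Chars.splitOn, pv_go (binding.toList.length + 1) binding.toList [] [] (by omega)]
  obtain ⟨hd, tl, heq⟩ := List.exists_cons_of_ne_nil (pvSplitNl_ne_nil binding.toList)
  simp [heq, List.modifyHead]

-- the token A's find/slice extracts from one line, as a closed form
def pvTokOf (cs : List Char) : Option (List Char) :=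
  if ("if {\"[").toList <+: cs ∧ ' ' ∈ cs.drop 6
  then some ((cs.drop 6).takeWhile (· ≠ ' ')) else none

theorem pvTokOf_nil : pvTokOf [] = none := by decide

def pvEmit (p : List Char) : String := String.ofList ((pvTokOf p).getD p)

-- A's per-line transformation, named so the fold can be rewritten as a map
def pvTransformA (bindStr : String) : String :=
  if PySem.Str.startswith bindStr "if {\"[" then
    let space := PySem.Str.findFrom bindStr " " 6
    if (-1 : Int) < space then PySem.Str.slice bindStr (some 6) (some space)
    else bindStr
  else bindStr

theorem pv_foldA (lines : List String) :
    lines.foldl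
      (fun bindList bindStr =>
        let bindStr :=
          if PySem.Str.startswith bindStr "if {\"[" then
            let space := PySem.Str.findFrom bindStr " " 6
            if (-1 : Int) < space then PySem.Str.slice bindStr (some 6) (some space)
            else bindStr
          else bindStr
        bindList ++ [bindStr]) [] = lines.map pvTransformA := by
  simpa using PySem.List.foldl_append_singleton_eq_map pvTransformA lines []

-- span of (· ≠ ' ') at the first occurrence of ' '
theorem pv_span_at (l : List Char) (n : Nat) (hn : n < l.length)
    (hat : l[n] = ' ') (hmin : ∀ i (h : i < n), l[i]'(by omega) ≠ ' ') :
    l.takeWhile (· ≠ ' ') = l.take n := by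
  induction l generalizing n with
  | nil => simp at hn
  | cons c cs ih =>
    cases n with
    | zero =>
      simp only [List.getElem_cons_zero] at hat
      subst hat
      rw [List.takeWhile_cons_of_neg (by simp), List.take_zero]
    | succ m =>
      have hc : c ≠ ' ' := by
        have := hmin 0 (by omega)
        simpa using this
      have hm : m < cs.length := by simpa using hn
      have hat' : cs[m] = ' ' := by simpa using hat
      have hmin' : ∀ i (h : i < m), cs[i]'(by omega) ≠ ' ' := by
        intro i hi
        have := hmin (i + 1) (by omega)
        simpa using this
      rw [List.take_succ_cons, List.takeWhile_cons_of_pos (by simp [hc]), ih m hm hat' hmin']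

-- A's find-and-slice on one line computes exactly pvEmit
theorem pv_tok_eq (line : String) : pvTransformA line = pvEmit line.toList := by
  unfold pvTransformA pvEmit pvTokOf
  by_cases h : PySem.Str.startswith line "if {\"[" = true
  · rw [if_pos h]
    have hpre : ("if {\"[").toList <+: line.toList := by
      apply (PySem.Chars.startswith_iff line.toList ("if {\"[").toList).mp
      rw [← PySem.Str.startswith_eq]; exact h
    have hlen : 6 ≤ line.toList.length := by
      have h1 := hpre.length_le
      have h2 : ("if {\"[").toList.length = 6 := by decide
      omega
    have hsp : (" ".toList) = [' '] := by decide
    have hfind : PySem.Str.findFrom line " " 6 =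
        if PySem.Chars.find (line.toList.drop 6) [' '] = -1 then (-1 : Int)
        else 6 + PySem.Chars.find (line.toList.drop 6) [' '] := by
      have h6 : (6 : Int) = ((6 : Nat) : Int) := by norm_num
      rw [PySem.Str.findFrom_eq, hsp, h6,
        PySem.Chars.findFrom_natCast line.toList [' '] 6 hlen]
    set rest := line.toList.drop 6 with hrdef
    set j := PySem.Chars.find rest [' '] with hjdef
    by_cases hneg : j = -1
    · have hnotmem : ' ' ∉ rest := by
        intro hm
        exact (PySem.Chars.find_eq_neg_one_iff rest [' ']).mp hneg
          ((List.singleton_infix_iff _ _).mpr hm)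
      have hnm : ¬ (("if {\"[").toList <+: line.toList ∧ ' ' ∈ rest) := fun hx => hnotmem hx.2
      rw [hfind, if_pos hneg, if_neg hnm, Option.getD_none, String.ofList_toList]
      norm_num
    · have hmem : ' ' ∈ rest := by
        have := (PySem.Chars.find_ne_neg_one_iff rest [' ']).mp hneg
        exact (List.singleton_infix_iff _ _).mp this
      have hj0 : (0 : Int) ≤ j := by
        have := PySem.Chars.neg_one_le_find rest [' ']
        rw [← hjdef] at this; omega
      obtain ⟨hpref, hmin⟩ := PySem.Chars.find_spec (s := rest) (sub := [' ']) hj0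
      set n := j.toNat with hndef
      have hj' : j = (n : Int) := (Int.toNat_of_nonneg hj0).symm
      have hnlt : n < rest.length := by
        by_contra hge
        rw [not_lt] at hge
        rw [List.drop_eq_nil_of_le hge] at hpref
        simp at hpref
      have hcons := List.drop_eq_getElem_cons hnlt
      have hat : rest[n] = ' ' := by
        obtain ⟨t, ht⟩ := hpref
        rw [hcons, List.singleton_append] at ht
        injection ht with h1 _
        exact h1.symm
      have hmin' : ∀ i (hi : i < n), rest[i]'(Nat.lt_trans hi hnlt) ≠ ' ' := by
        intro i hi hspi
        apply hmin i hi
        rw [List.drop_eq_getElem_cons (Nat.lt_trans hi hnlt), hspi]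
        exact ⟨rest.drop (i + 1), by simp⟩
      have hA : (PySem.Str.slice line (some 6) (some (6 + (n : Int)))).toList = rest.take n := by
        rw [PySem.Str.toList_slice, PySem.Chars.slice_eq_listSlice, hrdef]
        exact_mod_cast PySem.List.slice_natCast_add line.toList 6 n
      have hpos : (-1 : Int) < 6 + j := by omega
      have hcond : ("if {\"[").toList <+: line.toList ∧ ' ' ∈ rest := ⟨hpre, hmem⟩
      rw [hfind, if_neg hneg, if_pos hcond, Option.getD_some, if_pos hpos, hj',
        pv_span_at rest n hnlt hat hmin', ← hA, String.ofList_toList]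
  · rw [if_neg h, if_neg (by
      intro hc
      exact h ((PySem.Str.startswith_eq line "if {\"[") ▸
        (PySem.Chars.startswith_iff line.toList ("if {\"[").toList).mpr hc.1)),
      Option.getD_none, String.ofList_toList]

-- B's incremental token update maintains tok = pvTokOf line
theorem pv_step_ne (out : List String) (a : List Char) (c : Char) (hc : c ≠ '\n') :
    pvStep (out, a, pvTokOf a) c = (out, a ++ [c], pvTokOf (a ++ [c])) := by
  have hplen : ("if {\"[").toList.length = 6 := by decide
  unfold pvStep
  rw [if_neg hc]
  by_cases hpre : ("if {\"[").toList <+: a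
  · have hlen : 6 ≤ a.length := by have := hpre.length_le; omega
    have hpre' : ("if {\"[").toList <+: a ++ [c] := hpre.trans (a.prefix_append [c])
    have hdrop : (a ++ [c]).drop 6 = a.drop 6 ++ [c] :=
      List.drop_append_of_le_length hlen
    have hsw : PySem.Chars.startswith a ("if {\"[").toList = true :=
      (PySem.Chars.startswith_iff a _).mpr hpre
    by_cases hmem : ' ' ∈ a.drop 6
    · have htok : pvTokOf a = some ((a.drop 6).takeWhile (· ≠ ' ')) := by
        unfold pvTokOf; rw [if_pos ⟨hpre, hmem⟩]
      have htw : ((a.drop 6) ++ [c]).takeWhile (· ≠ ' ') = (a.drop 6).takeWhile (· ≠ ' ') := by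
        rw [List.takeWhile_append, if_neg]
        intro hlen2
        have heq : (a.drop 6).takeWhile (· ≠ ' ') = a.drop 6 :=
          (List.takeWhile_prefix _).eq_of_length hlen2
        have hbad := List.mem_takeWhile_imp (heq ▸ hmem)
        simp at hbad
      have htok' : pvTokOf (a ++ [c]) = some ((a.drop 6).takeWhile (· ≠ ' ')) := by
        unfold pvTokOf
        rw [if_pos ⟨hpre', by rw [hdrop]; exact List.mem_append_left [c] hmem⟩, hdrop, htw]
      rw [htok, htok', if_neg (by simp)]
    · have htok : pvTokOf a = none := by
        unfold pvTokOf; rw [if_neg (by tauto)]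
      by_cases hsp : c = ' '
      · subst hsp
        have hts : (a.drop 6).takeWhile (· ≠ ' ') = a.drop 6 := by
          rw [List.takeWhile_eq_self_iff]
          intro x hx
          simp only [decide_eq_true_eq, ne_eq]
          exact fun hxe => hmem (hxe ▸ hx)
        have htw : ((a.drop 6) ++ [' ']).takeWhile (· ≠ ' ') = a.drop 6 := by
          rw [List.takeWhile_append, if_pos (by rw [hts])]
          simp
        have htok' : pvTokOf (a ++ [' ']) = some (a.drop 6) := by
          unfold pvTokOf
          rw [if_pos ⟨hpre', by rw [hdrop]; simp⟩, hdrop, htw]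
        have hcnd : (none : Option (List Char)) = none ∧ ' ' = ' '
            ∧ PySem.Chars.startswith a ("if {\"[").toList = true := ⟨rfl, rfl, hsw⟩
        rw [htok, htok', if_pos hcnd]
      · have htok' : pvTokOf (a ++ [c]) = none := by
          unfold pvTokOf
          rw [if_neg]
          rintro ⟨-, hm⟩
          rw [hdrop] at hm
          rcases List.mem_append.mp hm with hm | hm
          · exact hmem hm
          · exact hsp (List.mem_singleton.mp hm).symm
        rw [htok, htok', if_neg (by tauto)]
  · have htok : pvTokOf a = none := by
      unfold pvTokOf; rw [if_neg (by tauto)]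
    have hsw : PySem.Chars.startswith a ("if {\"[").toList = false := by
      rw [← Bool.not_eq_true]
      intro hb
      exact hpre ((PySem.Chars.startswith_iff a _).mp hb)
    have htok' : pvTokOf (a ++ [c]) = none := by
      unfold pvTokOf
      rw [if_neg]
      rintro ⟨hp, hm⟩
      by_cases hla : 6 ≤ a.length
      · exact hpre ((List.isPrefix_append_of_length (by rw [hplen]; exact hla)).mp hp)
      · have hnil : (a ++ [c]).drop 6 = [] := by
          apply List.drop_eq_nil_of_le
          simp; omega
        rw [hnil] at hm
        simp at hm
    rw [htok, htok', if_neg (by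
      rintro ⟨-, -, hbad⟩
      rw [hsw] at hbad
      cases hbad)]

def pvFinal (st : List String × List Char × Option (List Char)) : List String :=
  st.1 ++ [String.ofList (st.2.2.getD st.2.1)]

-- the streaming fold, characterised against pvSplitNl
theorem pv_foldB (cs : List Char) : ∀ (out : List String) (a : List Char),
    pvFinal (cs.foldl pvStep (out, a, pvTokOf a))
      = out ++ ((pvSplitNl cs).modifyHead (a ++ ·)).map pvEmit := by
  induction cs with
  | nil =>
    intro out a
    simp [pvFinal, pvSplitNl, List.modifyHead, pvEmit]
  | cons c t ih =>
    intro out a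
    rw [List.foldl_cons]
    by_cases hc : c = '\n'
    · subst hc
      have hstep : pvStep (out, a, pvTokOf a) '\n'
          = (out ++ [pvEmit a], [], pvTokOf []) := by
        rw [pvTokOf_nil]
        simp [pvStep, pvEmit]
      rw [hstep, ih (out ++ [pvEmit a]) []]
      obtain ⟨hd, tl, heq⟩ := List.exists_cons_of_ne_nil (pvSplitNl_ne_nil t)
      simp [pvSplitNl, heq, List.modifyHead]
    · rw [pv_step_ne out a c hc, ih out (a ++ [c])]
      obtain ⟨hd, tl, heq⟩ := List.exists_cons_of_ne_nil (pvSplitNl_ne_nil t)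
      simp [pvSplitNl, hc, heq, List.modifyHead]

theorem sliceBindngs_eq (binding : String) :
    sliceBindngs binding = sliceBindngs_alt binding := by
  unfold sliceBindngs sliceBindngs_alt
  rw [pv_foldA, pv_split_eq]
  have hB : pvFinal (binding.toList.foldl pvStep ([], [], pvTokOf []))
      = ((pvSplitNl binding.toList).modifyHead (([] : List Char) ++ ·)).map pvEmit := by
    simpa using pv_foldB binding.toList [] []
  rw [pvTokOf_nil] at hB
  show ((pvSplitNl binding.toList).map String.ofList).map pvTransformA
      = pvFinal (binding.toList.foldl pvStep ([], [], none))
  rw [hB]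
  obtain ⟨hd, tl, heq⟩ := List.exists_cons_of_ne_nil (pvSplitNl_ne_nil binding.toList)
  rw [heq]
  simp only [List.modifyHead, List.nil_append, List.map_cons, List.map_map]
  congr 1
  · rw [pv_tok_eq, String.toList_ofList]
  · apply List.map_congr_left
    intro p _
    rw [Function.comp_apply, pv_tok_eq, String.toList_ofList]

-- ===== VERDICT (by name: the statement is the Claim_ definition above) =====
theorem sliceBindngs_spec : Claim_equal_sliceBindngs := by
  intro binding _
  exact sliceBindngs_eq binding
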